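-- pv_equiv track=rewrite | github.com/RuthlessXdream/computer-control-framework | src/vision/annotator.py | generate_letter_labels
-- ===== SOURCE A (Python) =====
-- from typing import List, Dict, Tuple, Optional
--
-- def generate_letter_labels(count: int) -> List[str]:
--     """
--     生成字母标签
--
--     Args:
--         count: 标签数量
--
--     Returns:
--         标签列表 ["A", "B", "C", ..., "AA", "AB", ...]
--     """
--     labels = []
--     for i in range(count):
--         label = ""
--         n = i
--         while True:
--             label = chr(65 + n % 26) + label
--             n = n // 26 - 1
--             if n < 0:
--                 break
--         labels.append(label)
--     return labels
-- ===== SOURCE B (Python) =====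
-- def generate_letter_labels(count):
--     """Odometer: keep current label as a char list starting at ['A'];
--     emit it, then increment with carry from the right."""
--     labels = []
--     cur = ['A']
--     for _ in range(count):
--         labels.append(''.join(cur))
--         i = len(cur) - 1
--         while i >= 0:
--             if cur[i] != 'Z':
--                 cur[i] = chr(ord(cur[i]) + 1)
--                 break
--             cur[i] = 'A'
--             i -= 1
--         else:
--             cur.insert(0, 'A')
--     return labels
-- ===== Notes on version B (the rewrite author's own statement) =====
-- stated objective: faster
-- what changed: Replaces the per-index bijective base-26 conversion (an inner digit loop for every i) with a single odometer that increments the current label in place with carry, amortised O(1) per label.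
import Mathlib
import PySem

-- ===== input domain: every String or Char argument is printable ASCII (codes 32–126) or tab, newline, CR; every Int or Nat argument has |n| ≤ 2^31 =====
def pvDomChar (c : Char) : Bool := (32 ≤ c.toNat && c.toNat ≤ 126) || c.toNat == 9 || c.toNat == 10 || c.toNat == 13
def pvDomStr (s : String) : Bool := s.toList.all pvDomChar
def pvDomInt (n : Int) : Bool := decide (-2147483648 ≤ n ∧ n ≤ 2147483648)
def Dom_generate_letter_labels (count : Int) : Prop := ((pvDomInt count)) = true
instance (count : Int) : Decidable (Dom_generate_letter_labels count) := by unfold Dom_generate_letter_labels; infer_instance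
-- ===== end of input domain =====

-- B replaces per-index base-26 conversion by an amortised O(1) odometer increment of the current label.

-- ===== PORT A =====
-- Python str label modeled as List Char (built by prepending chars), joined with String.mk at the end.
-- Inner while loop of A: n is always ≥ 0 when the loop runs (i ≥ 0), so it is recursion on Nat;
-- 'n // 26 - 1 < 0' is exactly 'n < 26'.
def convA (n : Nat) (label : List Char) : List Char :=
  let label := Char.ofNat (65 + n % 26) :: label
  if n < 26 then label else convA (n / 26 - 1) label
termination_by n
decreasing_by
  have h26 : n / 26 < n := Nat.div_lt_self (by omega) (by omega)
  omega

def generate_letter_labels (count : Int) : List String :=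
  -- range(count); each i in it satisfies 0 ≤ i, so i.toNat is exact
  (PySem.List.pyRange 0 count 1).foldl
    (fun labels i => labels ++ [String.mk (convA i.toNat [])]) []

-- ===== PORT B =====
-- increment scanning from the rightmost char = recursion on the reversed char list
def incRev : List Char → List Char
  | [] => ['A']                                  -- carry ran off the left end: prepend 'A'
  | c :: rest =>
    if c ≠ 'Z' then Char.ofNat (c.toNat + 1) :: rest
    else 'A' :: incRev rest

def genB : Nat → List Char → List String
  | 0, _ => []
  | k + 1, cur => String.mk cur :: genB k ((incRev cur.reverse).reverse)

def generate_letter_labels_alt (count : Int) : List String :=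
  genB count.toNat ['A']

-- ===== PRECONDITION & SPEC =====
def Spec_generate_letter_labels (count : Int) (out : List String) : Prop :=
  out = generate_letter_labels_alt count
instance (count : Int) (out : List String) : Decidable (Spec_generate_letter_labels count out) := by
  unfold Spec_generate_letter_labels; infer_instance

-- ===== CLAIM =====
def Claim_equal_generate_letter_labels : Prop :=
  ∀ (count : Int), Dom_generate_letter_labels count →
    Spec_generate_letter_labels count (generate_letter_labels count)

-- ===== LEMMAS AND PROOFS =====

-- least-significant-first digit list of label i
def rdig (n : Nat) : List Char :=
  Char.ofNat (65 + n % 26) :: (if n < 26 then [] else rdig (n / 26 - 1))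
termination_by n
decreasing_by
  have h26 : n / 26 < n := Nat.div_lt_self (by omega) (by omega)
  omega

lemma div_step_lt (n : Nat) (h : ¬ n < 26) : n / 26 - 1 < n := by
  have h26 : n / 26 < n := Nat.div_lt_self (by omega) (by omega)
  omega

lemma toNat_ofNat_small (m : Nat) (h : m < 55296) : (Char.ofNat m).toNat = m := by
  rw [Char.toNat_ofNat, if_pos (Or.inl h)]

lemma convA_eq (n : Nat) : ∀ label, convA n label = (rdig n).reverse ++ label := by
  induction n using Nat.strong_induction_on with
  | _ n ih =>
    intro label
    rw [convA, rdig]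
    by_cases h : n < 26
    · simp [h]
    · simp only [h, if_false]
      rw [ih (n / 26 - 1) (div_step_lt n h)]
      simp

lemma incRev_rdig (n : Nat) : incRev (rdig n) = rdig (n + 1) := by
  induction n using Nat.strong_induction_on with
  | _ n ih =>
    rw [rdig]
    by_cases hz : n % 26 = 25
    · have hZ : Char.ofNat (65 + n % 26) = 'Z' := by rw [hz]
      rw [incRev, hZ]
      simp only [ne_eq, not_true_eq_false, if_false]
      by_cases h : n < 26
      · -- n = 25 : 'Z' becomes "AA"
        have h25 : n = 25 := by omega
        subst h25
        norm_num
        rw [incRev]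
        conv_rhs => rw [rdig]
        norm_num
        conv_rhs => rw [rdig]
        norm_num
      · simp only [h, if_false]
        rw [ih (n / 26 - 1) (div_step_lt n h)]
        have h4 : n / 26 - 1 + 1 = n / 26 := by
          have := Nat.div_le_div_right (c := 26) (Nat.le_of_not_lt h)
          simp at this
          omega
        rw [h4]
        conv_rhs => rw [rdig]
        have h1 : (n + 1) % 26 = 0 := by omega
        have h2 : ¬ n + 1 < 26 := by omega
        have h5 : (n + 1) / 26 - 1 = n / 26 := by omega
        rw [h1, h5]
        simp only [h2, if_false]
    · -- no carry: bump the last char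
      have hlt : n % 26 < 25 := by omega
      have hv : (Char.ofNat (65 + n % 26)).toNat = 65 + n % 26 :=
        toNat_ofNat_small _ (by omega)
      have hne : Char.ofNat (65 + n % 26) ≠ 'Z' := by
        intro h
        have := congrArg Char.toNat h
        rw [hv] at this
        have hz90 : 'Z'.toNat = 90 := by decide
        omega
      rw [incRev]
      simp only [hne, ne_eq, not_false_eq_true, if_true]
      rw [hv]
      have hc : 65 + n % 26 + 1 = 65 + (n + 1) % 26 := by omega
      rw [hc]
      conv_rhs => rw [rdig]
      by_cases h : n < 26
      · simp [h, show n + 1 < 26 by omega]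
      · have h3 : (n + 1) / 26 - 1 = n / 26 - 1 := by omega
        simp [h, show ¬ n + 1 < 26 by omega, h3]

lemma genB_rdig (k : Nat) : ∀ m, genB k ((rdig m).reverse) =
    (List.range k).map (fun j => String.mk ((rdig (m + j)).reverse)) := by
  induction k with
  | zero => intro m; simp [genB]
  | succ k ih =>
    intro m
    rw [genB, List.reverse_reverse, incRev_rdig, ih (m + 1), List.range_succ_eq_map]
    have hadd : ∀ j, m + 1 + j = m + (j + 1) := fun j => by omega
    simp [List.map_map, Function.comp, hadd]

lemma foldl_append_map {α β : Type} (f : α → β) :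
    ∀ (l : List α) (acc : List β),
      l.foldl (fun labels i => labels ++ [f i]) acc = acc ++ l.map f := by
  intro l
  induction l with
  | nil => simp
  | cons x xs ih => intro acc; simp [List.foldl, ih]

-- ===== VERDICT =====
theorem generate_letter_labels_spec : Claim_equal_generate_letter_labels := by
  intro count _
  unfold Spec_generate_letter_labels generate_letter_labels generate_letter_labels_alt
  rw [foldl_append_map, PySem.List.pyRange_one]
  have h0 : (['A'] : List Char) = (rdig 0).reverse := by rw [rdig]; rfl
  rw [h0, genB_rdig, List.map_map]
  simp only [Int.sub_zero, List.nil_append]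
  congr 1
  funext j
  simp [Function.comp, convA_eq]
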